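-- pv_equiv track=rewrite | github.com/JonathanLu2005/LeetCode | 3723-maximize-sum-of-squares-of-digits/3723-maximize-sum-of-squares-of-digits.py | maxSumOfSquares
-- ===== SOURCE A (Python) =====
-- def maxSumOfSquares(num: int, sum: int) -> str:
--     # num and sum
--     # n good if
--     # number of digits in n == num
--     # sum of digits in n == sum
--     # score of n == sum of suqares in n
--     # return string result that maximise score
--     # have length of num, so that narrows down what numbers we can have
--     # and its sum of each digit is the sum
--     # that also helps us narrow down the number
--     # and for every value from 1 to n, we count the squares
--     # so this indicates we want the biggest number possible as it means more squares
--     # requirements - biggest number, length of num, add up to sum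
--     # if not possible return ""
--     # algorithm -> we iterate from up to num
--     # and from the sum, we try to take 9 away and put it in our result
--     # unless the current sum value is < 9, we include that
--     # and if its 0 then just add 0 really
--     # we keep going until we reach num length and met sum, return result
--     # if by the end of num, sum != 0, we return ""
--     result = ""
--
--     for i in range(num):
--         if sum >= 9:
--             result += "9"
--             sum -= 9
--         else:
--             result += str(sum)
--             sum -= sum
--
--     if sum > 0:
--         return ""
--     return result
-- ===== SOURCE B (Python) =====
-- def maxSumOfSquares(num: int, sum: int) -> str:
--     # Closed-form: a digit sum is achievable iff 0 <= sum <= 9*num; greedy answer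
--     # is full nines, then the remainder digit, then zeros.
--     if sum < 0 or sum > 9 * num:
--         return ""
--     full = sum // 9
--     rem = sum % 9
--     if full == num:
--         return "9" * num
--     return "9" * full + str(rem) + "0" * (num - full - 1)
-- ===== Notes on version B (the rewrite author's own statement) =====
-- stated objective: simpler
-- what changed: Replaces the per-digit greedy loop (append '9' while sum>=9, then the remainder, then zeros, with a final leftover check) by a closed-form feasibility test 0<=sum<=9*num plus arithmetic: full=sum//9, rem=sum%9, and string repetition '9'*full + str(rem) + '0'*(num-full-1).
-- intended difference: On num>=1 with sum<0 (an infeasible digit sum) A's else-branch appends str(sum) and returns a non-digit string like '-3' padded with zeros, while B returns '' as intended, since no digit string can have a negative digit sum. — e.g. on maxSumOfSquares(1, -3): A returns "-3", B returns ""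
import Mathlib
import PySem

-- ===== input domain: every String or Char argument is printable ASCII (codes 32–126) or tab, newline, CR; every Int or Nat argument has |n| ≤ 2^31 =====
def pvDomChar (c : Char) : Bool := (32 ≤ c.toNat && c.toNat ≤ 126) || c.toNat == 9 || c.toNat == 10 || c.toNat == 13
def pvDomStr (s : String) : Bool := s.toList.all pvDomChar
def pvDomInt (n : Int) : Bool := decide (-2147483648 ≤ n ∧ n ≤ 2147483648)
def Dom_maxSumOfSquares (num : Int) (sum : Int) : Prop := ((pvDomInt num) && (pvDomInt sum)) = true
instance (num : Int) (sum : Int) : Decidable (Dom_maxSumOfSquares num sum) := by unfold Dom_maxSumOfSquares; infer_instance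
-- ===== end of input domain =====

-- B replaces A's per-digit greedy loop by the closed-form feasibility test 0 <= sum <= 9*num
-- plus arithmetic (sum // 9, sum % 9) and string repetition; on infeasible negative sums
-- (num >= 1, sum < 0) A returns a non-digit string like "-3"+zeros while B returns "" (see D_).


-- ===== PORT A =====
-- the loop body: result is kept as a List Char (strings are built char-list side, String.ofList at the end)
def pvStepA (st : List Char × Int) : List Char × Int :=
  if st.2 ≥ 9 then (st.1 ++ ['9'], st.2 - 9)
  else (st.1 ++ PySem.Int.toChars st.2, st.2 - st.2)

def maxSumOfSquares (num : Int) (sum : Int) : String :=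
  let st := (PySem.List.pyRange 0 num 1).foldl (fun st (_i : Int) => pvStepA st) ([], sum)
  if st.2 > 0 then "" else String.ofList st.1

-- ===== PORT B =====
-- "c"*n for an Int n (negative n gives the empty string, as in Python)
def pvStrMul (cs : List Char) (n : Int) : List Char := (List.replicate n.toNat cs).flatten

def maxSumOfSquares_alt (num : Int) (sum : Int) : String :=
  if sum < 0 ∨ sum > 9 * num then ""
  else
    let full := PySem.Int.floordiv sum 9
    let rem := PySem.Int.mod sum 9
    if full = num then String.ofList (pvStrMul ['9'] num)
    else String.ofList (pvStrMul ['9'] full ++ PySem.Int.toChars rem ++ pvStrMul ['0'] (num - full - 1))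

-- ===== PRECONDITION & SPEC =====
-- On num ≥ 1 with sum < 0 (an infeasible digit sum) A's else-branch appends str(sum), returning a
-- non-digit string like "-3" padded with zeros; B returns "" as intended, since no digit string can
-- have a negative digit sum.
def D_maxSumOfSquares (num : Int) (sum : Int) : Prop := 1 ≤ num ∧ sum < 0
instance (num : Int) (sum : Int) : Decidable (D_maxSumOfSquares num sum) := by unfold D_maxSumOfSquares; infer_instance

def Spec_maxSumOfSquares (num : Int) (sum : Int) (out : String) : Prop := ¬ D_maxSumOfSquares num sum → out = maxSumOfSquares_alt num sum
instance (num : Int) (sum : Int) (out : String) : Decidable (Spec_maxSumOfSquares num sum out) := by unfold Spec_maxSumOfSquares; infer_instance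

def pvDiffWitness_maxSumOfSquares : Int × Int := (1, -3)
def pvDiffWitnessOut_maxSumOfSquares : String × String := ("-3", "")

-- ===== CLAIM (what is proved, stated in full; the proofs are below) =====
def Claim_unchanged_maxSumOfSquares : Prop := ∀ (num : Int) (sum : Int), Dom_maxSumOfSquares num sum → Spec_maxSumOfSquares num sum (maxSumOfSquares num sum)
def Claim_changed_maxSumOfSquares : Prop := Dom_maxSumOfSquares (pvDiffWitness_maxSumOfSquares.1) (pvDiffWitness_maxSumOfSquares.2) ∧ D_maxSumOfSquares (pvDiffWitness_maxSumOfSquares.1) (pvDiffWitness_maxSumOfSquares.2) ∧ maxSumOfSquares (pvDiffWitness_maxSumOfSquares.1) (pvDiffWitness_maxSumOfSquares.2) = pvDiffWitnessOut_maxSumOfSquares.1 ∧ maxSumOfSquares_alt (pvDiffWitness_maxSumOfSquares.1) (pvDiffWitness_maxSumOfSquares.2) = pvDiffWitnessOut_maxSumOfSquares.2 ∧ pvDiffWitnessOut_maxSumOfSquares.1 ≠ pvDiffWitnessOut_maxSumOfSquares.2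
def Claim_exact_maxSumOfSquares : Prop := ∀ (num : Int) (sum : Int), Dom_maxSumOfSquares num sum → D_maxSumOfSquares num sum → maxSumOfSquares num sum ≠ maxSumOfSquares_alt num sum

-- ===== LEMMAS AND PROOFS =====

/-- n iterations of A's loop body (the body ignores the loop variable). -/
def pvIterA : Nat → (List Char × Int) → (List Char × Int)
  | 0, st => st
  | n + 1, st => pvIterA n (pvStepA st)

theorem pvFoldl_const (l : List Int) (st : List Char × Int) :
    l.foldl (fun st (_i : Int) => pvStepA st) st = pvIterA l.length st := by
  induction l generalizing st with
  | nil => rfl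
  | cons x xs ih => simp [List.foldl, pvIterA, ih]

theorem pvIterA_acc (n : Nat) (acc : List Char) (s : Int) :
    pvIterA n (acc, s) = (acc ++ (pvIterA n ([], s)).1, (pvIterA n ([], s)).2) := by
  induction n generalizing acc s with
  | zero => simp [pvIterA]
  | succ n ih =>
    simp only [pvIterA, pvStepA]
    by_cases h : s ≥ 9
    · simp only [h, ite_true]
      rw [ih (acc ++ ['9']) (s - 9), ih ([] ++ ['9']) (s - 9)]
      simp
    · simp only [h, ite_false]
      rw [ih (acc ++ PySem.Int.toChars s) (s - s), ih ([] ++ PySem.Int.toChars s) (s - s)]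
      simp

theorem pvIterA_snd (n : Nat) (s : Int) (hs : 0 ≤ s) :
    (pvIterA n ([], s)).2 = if 9 * (n : Int) ≤ s then s - 9 * n else 0 := by
  induction n generalizing s with
  | zero =>
    have h0 : (pvIterA 0 ([], s)).2 = s := rfl
    rw [h0]; split_ifs <;> omega
  | succ n ih =>
    simp only [pvIterA, pvStepA]
    by_cases h : s ≥ 9
    · simp only [h, ite_true]
      rw [pvIterA_acc, ih (s - 9) (by omega)]
      push_cast
      split_ifs <;> omega
    · simp only [h, ite_false, sub_self]
      rw [pvIterA_acc, ih 0 le_rfl]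
      push_cast
      split_ifs <;> omega

theorem pvIterA_fst (n : Nat) (s : Int) (hs : 0 ≤ s) (hle : s ≤ 9 * (n : Int)) :
    (pvIterA n ([], s)).1 =
      if s / 9 = (n : Int) then List.replicate n '9'
      else List.replicate (s / 9).toNat '9' ++ PySem.Int.toChars (s % 9)
             ++ List.replicate (n - (s / 9).toNat - 1) '0' := by
  induction n generalizing s with
  | zero =>
    have hs0 : s = 0 := by omega
    subst hs0
    simp [pvIterA]
  | succ n ih =>
    simp only [pvIterA, pvStepA]
    by_cases h : s ≥ 9
    · simp only [h, ite_true]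
      rw [pvIterA_acc, ih (s - 9) (by omega) (by push_cast; omega)]
      have hdiv : (s - 9) / 9 = s / 9 - 1 := by omega
      have hmod : (s - 9) % 9 = s % 9 := by omega
      have hq1 : 1 ≤ s / 9 := by omega
      have hqle : s / 9 ≤ (n : Int) + 1 := by omega
      rw [hdiv, hmod]
      by_cases hq : s / 9 = (n : Int) + 1
      · have hth : s / 9 - 1 = (n : Int) := by omega
        simp only [hq, hth]
        push_cast
        simp [List.replicate_succ]
      · have hne : s / 9 - 1 ≠ (n : Int) := by omega
        have ht : (s / 9).toNat = (s / 9 - 1).toNat + 1 := by omega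
        have hz : (n + 1) - (s / 9).toNat - 1 = n - (s / 9 - 1).toNat - 1 := by omega
        push_cast
        simp only [if_neg hq, if_neg hne, ht, hz, List.replicate_succ]
        simp [List.append_assoc]
    · -- s < 9 : the remainder digit is written, the rest of the loop writes zeros
      simp only [h, ite_false, sub_self]
      rw [pvIterA_acc, ih 0 le_rfl (by positivity)]
      have hq : s / 9 = 0 := by omega
      have hm : s % 9 = s := by omega
      rw [hq, hm]
      by_cases hn : n = 0
      · subst hn
        norm_num
      · obtain ⟨m, rfl⟩ : ∃ m, n = m + 1 := ⟨n - 1, by omega⟩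
        have h1 : ¬ ((0 : Int) / 9 = ((m : Int) + 1)) := by omega
        have h2 : ¬ ((0 : Int) = ((m : Int) + 1 + 1)) := by omega
        have h0 : PySem.Int.toChars ((0 : Int) % 9) = ['0'] := rfl
        push_cast
        simp only [if_neg h1, if_neg h2, h0]
        norm_num
        split_ifs with hif
        · exact absurd hif (by omega)
        · simp [show PySem.Int.toChars 0 = ['0'] from rfl, List.replicate_succ]

theorem pvStrMul_single (c : Char) (n : Int) : pvStrMul [c] n = List.replicate n.toNat c := by
  unfold pvStrMul
  induction n.toNat with
  | zero => rfl
  | succ k ih => simp [List.replicate_succ, ih]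

theorem pvFloordiv9 (s : Int) : PySem.Int.floordiv s 9 = s / 9 :=
  PySem.Int.floordiv_eq_ediv_of_pos (by norm_num)

theorem pvMod9 (s : Int) : PySem.Int.mod s 9 = s % 9 :=
  PySem.Int.mod_eq_emod_of_pos (by norm_num)

-- ===== VERDICT (by name: the statement is the Claim_ definition above) =====
theorem maxSumOfSquares_spec : Claim_unchanged_maxSumOfSquares := by
  intro num sum _ hD
  simp only [maxSumOfSquares, maxSumOfSquares_alt]
  rw [pvFoldl_const, PySem.List.length_pyRange_one]
  by_cases hnum : num ≤ 0
  · -- empty loop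
    have : (num - 0).toNat = 0 := by omega
    rw [this]
    simp only [pvIterA]
    by_cases hs : sum > 0
    · have hc : sum < 0 ∨ sum > 9 * num := Or.inr (by omega)
      rw [if_pos hs, if_pos hc]
    · rw [if_neg hs]
      by_cases hneg : sum < 0
      · rw [if_pos (Or.inl hneg)]
      · have hs0 : sum = 0 := by omega
        subst hs0
        by_cases hn0 : num = 0
        · subst hn0
          norm_num [pvFloordiv9, pvStrMul]
        · have hc : (0 : Int) < 0 ∨ (0 : Int) > 9 * num := Or.inr (by omega)
          rw [if_pos hc]
  · -- num ≥ 1, hence (¬ D) forces 0 ≤ sum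
    have hnum1 : 1 ≤ num := by omega
    have hsum : 0 ≤ sum := by
      by_contra hc
      exact hD ⟨hnum1, by omega⟩
    have hn : ((num - 0).toNat : Int) = num := by omega
    rw [pvIterA_snd _ _ hsum]
    by_cases hbig : sum > 9 * num
    · have hc1 : (if 9 * ((num - 0).toNat : Int) ≤ sum then sum - 9 * ((num - 0).toNat : Int) else 0) > 0 := by
        split_ifs <;> omega
      have hc2 : sum < 0 ∨ sum > 9 * num := Or.inr hbig
      rw [if_pos hc1, if_pos hc2]
    · have hle : sum ≤ 9 * ((num - 0).toNat : Int) := by omega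
      rw [if_neg (by split_ifs <;> omega), if_neg (by omega : ¬ (sum < 0 ∨ sum > 9 * num))]
      rw [pvIterA_fst _ _ hsum hle]
      simp only [pvFloordiv9, pvMod9, pvStrMul_single]
      rw [hn]
      by_cases hq : sum / 9 = num
      · rw [if_pos hq, if_pos hq, show (num - 0).toNat = num.toNat by omega]
      · rw [if_neg hq, if_neg hq,
          show (num - 0).toNat - (sum / 9).toNat - 1 = (num - sum / 9 - 1).toNat by omega]

theorem maxSumOfSquares_changed : Claim_changed_maxSumOfSquares := by
  unfold Claim_changed_maxSumOfSquares; decide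

theorem maxSumOfSquares_tight : Claim_exact_maxSumOfSquares := by
  intro num sum _ hd
  obtain ⟨hnum, hsum⟩ := hd
  simp only [maxSumOfSquares, maxSumOfSquares_alt]
  rw [pvFoldl_const, PySem.List.length_pyRange_one]
  rw [if_pos (Or.inl hsum)]
  obtain ⟨m, hm⟩ : ∃ m, (num - 0).toNat = m + 1 := ⟨(num - 0).toNat - 1, by omega⟩
  rw [hm]
  simp only [pvIterA, pvStepA, if_neg (by omega : ¬ sum ≥ 9), sub_self]
  rw [pvIterA_acc]
  have h2 : (pvIterA m ([], 0)).2 = 0 := by rw [pvIterA_snd m 0 le_rfl]; split_ifs <;> omega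
  rw [h2]
  norm_num
  intro hcontra
  simp [PySem.Int.toChars, hsum] at hcontra
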